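-- pv_equiv track=rewrite | github.com/DamonGeelen/Connect-Four-AI | my_ai.py | left_streak_check
-- ===== SOURCE A (Python) =====
-- def left_streak_check(board, symbol):
--     # Keep track of streak
--     left_streak = 0
--
--     # Keep track of checked spaces
--     checked = []
--
--     # Check for streaks moving to the left
--     for col in range(len(board) - 1, 2, -1):
--         for row in range(len(board[0])):
--
--             # Skip checked spaces
--             if [col, row] in checked:
--                 continue
--
--             else:
--                 if board[col][row] == symbol:
--                     i = 1
--                     while col - i >= 0 and board[col - i][row] == symbol:
--                         checked.append([col - i, row])
--                         i += 1
--
--                     # Only count streak if it is not blocked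
--                     if col - i >= 0 and board[col - i][row] == ' ':
--                         left_streak += i - 1
--
--     return left_streak
-- ===== SOURCE B (Python) =====
-- def left_streak_check(board, symbol):
--     # Row-major run scan: pull each row out as a strip of cells, walk it once,
--     # and for every maximal run of `symbol` add its length minus one when the
--     # cell just left of the run is blank and the run reaches column 3 or
--     # beyond (shorter runs can never grow into a four-in-a-row on the left).
--     if not board:
--         return 0
--     total = 0
--     for row in range(len(board[0])):
--         strip = [column[row] for column in board]
--         c = 0
--         while c < len(strip):
--             if strip[c] == symbol:
--                 start = c
--                 while c < len(strip) and strip[c] == symbol: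
--                     c += 1
--                 end = c - 1
--                 if end >= 3 and start >= 1 and strip[start - 1] == ' ':
--                     total += end - start
--             else:
--                 c += 1
--     return total
-- ===== Notes on version B (the rewrite author's own statement) =====
-- stated objective: alternative
-- what changed: B drops A's mutable `checked` list and its column-outer leftward while-loops: it walks each row once as a strip, finds maximal runs of the symbol, and adds run-length-1 for every run whose left neighbour is blank and whose right end is at column 3 or beyond; Pre_ excludes ragged boards (a column shorter than column 0), where A can raise IndexError or return an accident of which cells its loops reach while B's row-strip extraction raises.
-- outside the precondition, e.g. on left_streak_check([['a', 'b'], ['c']], 'x'): A returns 0, B raises IndexError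
import Mathlib
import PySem

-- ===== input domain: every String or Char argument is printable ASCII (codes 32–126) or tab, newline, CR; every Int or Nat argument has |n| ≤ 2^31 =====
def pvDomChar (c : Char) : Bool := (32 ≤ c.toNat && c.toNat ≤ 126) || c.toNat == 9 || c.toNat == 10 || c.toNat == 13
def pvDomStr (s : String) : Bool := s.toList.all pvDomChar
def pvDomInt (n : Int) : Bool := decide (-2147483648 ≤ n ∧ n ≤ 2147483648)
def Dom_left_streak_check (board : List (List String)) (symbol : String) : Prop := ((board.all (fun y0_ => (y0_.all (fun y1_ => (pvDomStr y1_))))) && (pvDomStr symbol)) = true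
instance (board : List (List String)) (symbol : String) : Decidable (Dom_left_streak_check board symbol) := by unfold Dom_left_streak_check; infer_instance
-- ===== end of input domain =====

-- B replaces A's column-outer loops with a `checked` list by a single run scan over each
-- row's strip of cells; objective: alternative decomposition (no checked-list bookkeeping).

-- cell accessor board[c][r] (port A; the out-of-range default is never hit under Pre_)
def pvCell (board : List (List String)) (c r : Int) : String :=
  PySem.List.pyGetD (PySem.List.pyGetD board c []) r ""

-- ===== PORT A =====
-- the inner `while col - i >= 0 and board[col-i][row] == symbol` loop of A
-- (structural recursion on an exact fuel so that the kernel can evaluate it)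
def pvWhileAF (board : List (List String)) (symbol : String) (col row : Int) :
    Nat → Int → List (Int × Int) → Int × List (Int × Int)
  | 0, i, checked => (i, checked)
  | n + 1, i, checked =>
      if 0 ≤ col - i ∧ pvCell board (col - i) row = symbol then
        pvWhileAF board symbol col row n (i + 1) (checked ++ [(col - i, row)])
      else (i, checked)

def pvWhileA (board : List (List String)) (symbol : String) (col row : Int)
    (i : Int) (checked : List (Int × Int)) : Int × List (Int × Int) :=
  pvWhileAF board symbol col row (col - i + 1).toNat i checked

def left_streak_check (board : List (List String)) (symbol : String) : Int :=
  ((PySem.List.pyRange ((board.length : Int) - 1) 2 (-1)).foldl (fun st col =>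
    (PySem.List.pyRange 0 ((board.headD []).length : Int) 1).foldl (fun st row =>
      if (col, row) ∈ st.2 then st
      else if pvCell board col row = symbol then
        let w := pvWhileA board symbol col row 1 st.2
        if 0 ≤ col - w.1 ∧ pvCell board (col - w.1) row = " " then (st.1 + w.1 - 1, w.2)
        else (st.1, w.2)
      else st) st) ((0 : Int), ([] : List (Int × Int)))).1

-- ===== PORT B =====
-- the strip [column[row] for column in board] of Source B
def pvStrip (board : List (List String)) (row : Int) : List String :=
  board.map (fun column => PySem.List.pyGetD column row "")

-- the inner `while c < len(strip) and strip[c] == symbol: c += 1` of Source B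
-- (structural recursion on an exact fuel so that the kernel can evaluate it)
def pvAdvF (strip : List String) (symbol : String) : Nat → Int → Int
  | 0, c => c
  | n + 1, c =>
      if c < (strip.length : Int) ∧ PySem.List.pyGetD strip c "" = symbol then
        pvAdvF strip symbol n (c + 1)
      else c

def pvAdv (strip : List String) (symbol : String) (c : Int) : Int :=
  pvAdvF strip symbol ((strip.length : Int) - c).toNat c

-- the outer `while c < len(strip)` scan of Source B; fuel strip.length suffices since
-- c starts at 0 and strictly increases each iteration
def pvScanF (strip : List String) (symbol : String) : Nat → Int → Int → Int
  | 0, _, total => total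
  | n + 1, c, total =>
      if c < (strip.length : Int) then
        if PySem.List.pyGetD strip c "" = symbol then
          let c' := pvAdv strip symbol c
          pvScanF strip symbol n c'
            (if 3 ≤ c' - 1 ∧ 1 ≤ c ∧ PySem.List.pyGetD strip (c - 1) "" = " "
             then total + (c' - 1) - c else total)
        else pvScanF strip symbol n (c + 1) total
      else total

def left_streak_check_alt (board : List (List String)) (symbol : String) : Int :=
  if board = [] then 0
  else (PySem.List.pyRange 0 ((board.headD []).length : Int) 1).foldl
    (fun total row => pvScanF (pvStrip board row) symbol (pvStrip board row).length 0 total) 0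

-- ===== PRECONDITION & SPEC =====
-- Pre_ excludes boards with a column shorter than column 0: there Python A (for boards of
-- length ≥ 4) and Python B can raise IndexError, and on such ragged boards where A happens
-- to return, its value is an accident of which cells its loops reach, so it is not claimed.
def Pre_left_streak_check (board : List (List String)) (symbol : String) : Prop :=
  ∀ col ∈ board, (board.headD []).length ≤ col.length
instance (board : List (List String)) (symbol : String) : Decidable (Pre_left_streak_check board symbol) := by unfold Pre_left_streak_check; infer_instance

def pvWitness_left_streak_check : List (List String) × String := ([[" "], ["x"], ["x"], ["x"]], "x")

def Spec_left_streak_check (board : List (List String)) (symbol : String) (out : Int) : Prop := out = left_streak_check_alt board symbol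
instance (board : List (List String)) (symbol : String) (out : Int) : Decidable (Spec_left_streak_check board symbol out) := by unfold Spec_left_streak_check; infer_instance

-- ===== CLAIM (what is proved, stated in full; the proofs are below) =====
def Claim_equal_left_streak_check : Prop := ∀ (board : List (List String)) (symbol : String), Dom_left_streak_check board symbol → Pre_left_streak_check board symbol → Spec_left_streak_check board symbol (left_streak_check board symbol)

-- ===== LEMMAS AND PROOFS =====

-- downward run length of `symbol` in row r from column c (counting c, c-1, …)
def pvDnF (board : List (List String)) (symbol : String) (r : Int) : Nat → Int → Int
  | 0, _ => 0
  | n + 1, c => if 0 ≤ c ∧ pvCell board c r = symbol then 1 + pvDnF board symbol r n (c - 1) else 0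

def pvDn (board : List (List String)) (symbol : String) (r c : Int) : Int :=
  pvDnF board symbol r (c + 1).toNat c

-- contribution A books when it processes column b of row r (b a maximal-run right end)
def pvCE (board : List (List String)) (symbol : String) (r b : Int) : Int :=
  if pvCell board b r = symbol ∧ (b = (board.length : Int) - 1 ∨ pvCell board (b + 1) r ≠ symbol)
      ∧ 3 ≤ b ∧ 1 ≤ b - pvDn board symbol r (b - 1)
      ∧ pvCell board (b - pvDn board symbol r (b - 1) - 1) r = " "
  then pvDn board symbol r (b - 1) else 0

-- invariant on A's `checked` list when column col is the next to be processed in row r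
def pvInv (board : List (List String)) (symbol : String) (col r : Int) (K : List (Int × Int)) : Prop :=
  ∀ c : Int, 0 ≤ c → c ≤ col →
    ((c, r) ∈ K ↔ (col < (board.length : Int) - 1 ∧ ∀ c', c ≤ c' → c' ≤ col + 1 → pvCell board c' r = symbol))

-- A's inner (per-row) loop body
def pvStepIn (board : List (List String)) (symbol : String) (col : Int) :
    Int × List (Int × Int) → Int → Int × List (Int × Int) := fun st row =>
  if (col, row) ∈ st.2 then st
  else if pvCell board col row = symbol then
    let w := pvWhileA board symbol col row 1 st.2
    if 0 ≤ col - w.1 ∧ pvCell board (col - w.1) row = " " then (st.1 + w.1 - 1, w.2)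
    else (st.1, w.2)
  else st

theorem pvDn_eq (board : List (List String)) (symbol : String) (r c : Int) :
    pvDn board symbol r c
      = if 0 ≤ c ∧ pvCell board c r = symbol then 1 + pvDn board symbol r (c - 1) else 0 := by
  by_cases hg : 0 ≤ c ∧ pvCell board c r = symbol
  · rw [if_pos hg]
    unfold pvDn
    rw [show (c + 1).toNat = (c - 1 + 1).toNat + 1 from by omega]
    simp only [pvDnF]
    rw [if_pos hg]
  · rw [if_neg hg]
    unfold pvDn
    cases hn : (c + 1).toNat with
    | zero => simp only [pvDnF]
    | succ n => simp only [pvDnF]; rw [if_neg hg]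

theorem pvWhileA_eq (board : List (List String)) (symbol : String) (col row i : Int)
    (checked : List (Int × Int)) :
    pvWhileA board symbol col row i checked
      = if 0 ≤ col - i ∧ pvCell board (col - i) row = symbol then
          pvWhileA board symbol col row (i + 1) (checked ++ [(col - i, row)])
        else (i, checked) := by
  by_cases hg : 0 ≤ col - i ∧ pvCell board (col - i) row = symbol
  · rw [if_pos hg]
    unfold pvWhileA
    rw [show (col - i + 1).toNat = (col - (i + 1) + 1).toNat + 1 from by omega]
    simp only [pvWhileAF]
    rw [if_pos hg]
  · rw [if_neg hg]
    unfold pvWhileA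
    cases hn : (col - i + 1).toNat with
    | zero => simp only [pvWhileAF]
    | succ n => simp only [pvWhileAF]; rw [if_neg hg]

-- descending induction principle matching pvDn's recursion
theorem pvDn_ind (board : List (List String)) (symbol : String) (r : Int) (P : Int → Prop)
    (hpos : ∀ c, (0 ≤ c ∧ pvCell board c r = symbol) → P (c - 1) → P c)
    (hneg : ∀ c, ¬ (0 ≤ c ∧ pvCell board c r = symbol) → P c) : ∀ c, P c := by
  have key : ∀ (n : Nat) (c : Int), (c + 1).toNat ≤ n → P c := by
    intro n
    induction n with
    | zero => intro c hc; exact hneg c (fun h => by omega)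
    | succ n ih =>
        intro c hc
        by_cases hg : 0 ≤ c ∧ pvCell board c r = symbol
        · exact hpos c hg (ih (c - 1) (by omega))
        · exact hneg c hg
  intro c
  exact key (c + 1).toNat c le_rfl

theorem pvDn_nonneg (board : List (List String)) (symbol : String) (r c : Int) :
    0 ≤ pvDn board symbol r c := by
  refine pvDn_ind board symbol r (fun c => 0 ≤ pvDn board symbol r c) ?_ ?_ c
  · intro c hg ih; rw [pvDn_eq, if_pos hg]; omega
  · intro c hg; rw [pvDn_eq, if_neg hg]

theorem pvDn_mem (board : List (List String)) (symbol : String) (r c : Int) :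
    ∀ c', c - pvDn board symbol r c < c' → c' ≤ c → pvCell board c' r = symbol := by
  refine pvDn_ind board symbol r
    (fun c => ∀ c', c - pvDn board symbol r c < c' → c' ≤ c → pvCell board c' r = symbol) ?_ ?_ c
  · intro c hg ih c' h1 h2
    have hd : pvDn board symbol r c = 1 + pvDn board symbol r (c - 1) := by
      rw [pvDn_eq, if_pos hg]
    rcases eq_or_lt_of_le h2 with rfl | hlt
    · exact hg.2
    · rw [hd] at h1
      exact ih c' (by omega) (by omega)
  · intro c hg c' h1 h2
    have hd : pvDn board symbol r c = 0 := by rw [pvDn_eq, if_neg hg]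
    rw [hd] at h1; omega

theorem pvDn_ge (board : List (List String)) (symbol : String) (r : Int) :
    ∀ (k : Nat) (c a : Int), 0 ≤ a → c - a = (k : Int) →
    (∀ c', a ≤ c' → c' ≤ c → pvCell board c' r = symbol) → c - a + 1 ≤ pvDn board symbol r c := by
  intro k
  induction k with
  | zero =>
      intro c a ha hk hall
      rw [pvDn_eq, if_pos ⟨by omega, hall c (by omega) le_rfl⟩]
      have := pvDn_nonneg board symbol r (c - 1); omega
  | succ n ih =>
      intro c a ha hk hall
      rw [pvDn_eq, if_pos ⟨by omega, hall c (by omega) le_rfl⟩]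
      have := ih (c - 1) a ha (by omega) (fun c' h1 h2 => hall c' h1 (by omega)); omega

-- pvDn of the cell just below a run start is 0, and pvDn of a full run is its length
theorem pvDn_run (board : List (List String)) (symbol : String) (r a : Int)
    (ha : 0 ≤ a) (hstart : ¬ (0 ≤ a - 1 ∧ pvCell board (a - 1) r = symbol)) :
    ∀ (k : Nat) (e : Int), e - a + 1 = (k : Int) → e ≤ (board.length : Int) →
    (∀ x, a ≤ x → x ≤ e → pvCell board x r = symbol) →
    pvDn board symbol r e = e - a + 1 := by
  intro k
  induction k with
  | zero =>
      intro e hk _ _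
      have he : e = a - 1 := by omega
      subst he
      rw [pvDn_eq, if_neg hstart]
      omega
  | succ n ih =>
      intro e hk hlen hall
      rw [pvDn_eq, if_pos ⟨by omega, hall e (by omega) le_rfl⟩,
        ih (e - 1) (by omega) (by omega) (fun x h1 h2 => hall x h1 (by omega))]
      omega

theorem pvWhileA_spec_aux (board : List (List String)) (symbol : String) (col r : Int) :
    ∀ (n : Nat) (i : Int) (K : List (Int × Int)), (col - i + 1).toNat ≤ n →
    pvWhileA board symbol col r i K =
      (i + pvDn board symbol r (col - i),
       K ++ (PySem.List.pyRange (col - i) (col - i - pvDn board symbol r (col - i)) (-1)).map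
         (fun c => (c, r))) := by
  intro n
  induction n with
  | zero =>
      intro i K hn
      have hg : ¬ (0 ≤ col - i ∧ pvCell board (col - i) r = symbol) := fun hh => by omega
      rw [pvWhileA_eq, if_neg hg]
      have hd : pvDn board symbol r (col - i) = 0 := by rw [pvDn_eq, if_neg hg]
      rw [hd, show col - i - 0 = col - i from by ring,
        PySem.List.pyRange_neg_one_eq_nil le_rfl]
      simp
  | succ n ih =>
      intro i K hn
      by_cases hg : 0 ≤ col - i ∧ pvCell board (col - i) r = symbol
      · rw [pvWhileA_eq, if_pos hg, ih (i + 1) (K ++ [(col - i, r)]) (by omega)]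
        have hd : pvDn board symbol r (col - i) = 1 + pvDn board symbol r (col - i - 1) := by
          rw [pvDn_eq, if_pos hg]
        have harg : col - (i + 1) = col - i - 1 := by ring
        rw [harg, hd]
        have hd0 := pvDn_nonneg board symbol r (col - i - 1)
        rw [PySem.List.pyRange_neg_one_cons
          (show col - i - (1 + pvDn board symbol r (col - i - 1)) < col - i by omega)]
        rw [show col - i - (1 + pvDn board symbol r (col - i - 1))
              = col - i - 1 - pvDn board symbol r (col - i - 1) from by ring]
        simp only [List.map_cons, Prod.mk.injEq, List.append_assoc, List.singleton_append]
        exact ⟨by omega, by trivial⟩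
      · rw [pvWhileA_eq, if_neg hg]
        have hd : pvDn board symbol r (col - i) = 0 := by rw [pvDn_eq, if_neg hg]
        rw [hd, show col - i - 0 = col - i from by ring,
          PySem.List.pyRange_neg_one_eq_nil le_rfl]
        simp

theorem pvWhileA_spec (board : List (List String)) (symbol : String) (col r : Int) :
    ∀ (i : Int) (K : List (Int × Int)),
    pvWhileA board symbol col r i K =
      (i + pvDn board symbol r (col - i),
       K ++ (PySem.List.pyRange (col - i) (col - i - pvDn board symbol r (col - i)) (-1)).map
         (fun c => (c, r))) := by
  intro i K
  exact pvWhileA_spec_aux board symbol col r (col - i + 1).toNat i K le_rfl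

theorem pvStep1 (board : List (List String)) (symbol : String) (col r ls : Int)
    (K : List (Int × Int))
    (hInv : pvInv board symbol col r K) (h3 : 3 ≤ col) (hle : col ≤ (board.length : Int) - 1) :
    ∃ K'', pvStepIn board symbol col (ls, K) r = (ls + pvCE board symbol r col, K'')
      ∧ pvInv board symbol (col - 1) r K''
      ∧ (∀ p : Int × Int, p.2 ≠ r → (p ∈ K'' ↔ p ∈ K)) := by
  by_cases hmem : (col, r) ∈ K
  · obtain ⟨hlt, hall⟩ := (hInv col (by omega) le_rfl).mp hmem
    refine ⟨K, ?_, ?_, fun p _ => Iff.rfl⟩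
    · have hCE : pvCE board symbol r col = 0 := by
        rw [pvCE, if_neg]
        rintro ⟨-, hre, -⟩
        rcases hre with he | he
        · omega
        · exact he (hall (col + 1) (by omega) le_rfl)
      rw [hCE]
      simp [pvStepIn, hmem]
    · intro c hc0 hc
      have h1 := hInv c hc0 (by omega)
      constructor
      · intro hk
        obtain ⟨-, hall'⟩ := h1.mp hk
        exact ⟨by omega, fun c' hc1 hc2 => hall' c' hc1 (by omega)⟩
      · rintro ⟨-, hall'⟩
        apply h1.mpr
        refine ⟨hlt, fun c' hc1 hc2 => ?_⟩
        by_cases hcc : c' ≤ col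
        · exact hall' c' hc1 (by omega)
        · have hc' : c' = col + 1 := by omega
          subst hc'
          exact hall (col + 1) (by omega) le_rfl
  · by_cases hsym : pvCell board col r = symbol
    · -- col is the right end of a maximal run: the while-loop runs
      have hrest := pvWhileA_spec board symbol col r 1 K
      have hnotRHS : ¬ ((col : Int) < (board.length : Int) - 1
          ∧ ∀ c', col ≤ c' → c' ≤ col + 1 → pvCell board c' r = symbol) :=
        fun hr => hmem ((hInv col (by omega) le_rfl).mpr hr)
      have hend : col = (board.length : Int) - 1 ∨ pvCell board (col + 1) r ≠ symbol := by
        by_cases hl : col = (board.length : Int) - 1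
        · exact Or.inl hl
        · refine Or.inr fun hsy => hnotRHS ⟨by omega, fun c' h1 h2 => ?_⟩
          by_cases hcc : c' = col
          · rw [hcc]; exact hsym
          · have hcc1 : c' = col + 1 := by omega
            rw [hcc1]; exact hsy
      have hKnone : ∀ c : Int, 0 ≤ c → c ≤ col → (c, r) ∉ K := by
        intro c h0 h1 hk
        obtain ⟨hlt, hall⟩ := (hInv c h0 h1).mp hk
        rcases hend with he | he
        · omega
        · exact he (hall (col + 1) (by omega) (by omega))
      have hd0 := pvDn_nonneg board symbol r (col - 1)
      have hcells : ∀ c', col - pvDn board symbol r (col - 1) ≤ c' → c' ≤ col →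
          pvCell board c' r = symbol := by
        intro c' h1 h2
        by_cases hcc : c' = col
        · rw [hcc]; exact hsym
        · exact pvDn_mem board symbol r (col - 1) c' (by omega) (by omega)
      have hmemK : ∀ c : Int,
          ((c, r) ∈ K ++ (PySem.List.pyRange (col - 1) (col - 1 - pvDn board symbol r (col - 1)) (-1)).map (fun x => (x, r))
            ↔ (c, r) ∈ K ∨ (col - pvDn board symbol r (col - 1) ≤ c ∧ c ≤ col - 1)) := by
        intro c
        simp only [List.mem_append, List.mem_map, PySem.List.mem_pyRange_neg_one, Prod.mk.injEq]
        constructor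
        · rintro (hk | ⟨x, ⟨hx1, hx2⟩, hx3, -⟩)
          · exact Or.inl hk
          · right; omega
        · rintro (hk | ⟨h1, h2⟩)
          · exact Or.inl hk
          · exact Or.inr ⟨c, ⟨by omega, by omega⟩, rfl, trivial⟩
      refine ⟨K ++ (PySem.List.pyRange (col - 1) (col - 1 - pvDn board symbol r (col - 1)) (-1)).map (fun x => (x, r)), ?_, ?_, ?_⟩
      · simp only [pvStepIn, hmem, if_pos hsym, hrest]
        by_cases hblank : 0 ≤ col - (1 + pvDn board symbol r (col - 1))
            ∧ pvCell board (col - (1 + pvDn board symbol r (col - 1))) r = " "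
        · rw [if_pos hblank]
          have hCE : pvCE board symbol r col = pvDn board symbol r (col - 1) := by
            rw [pvCE, if_pos]
            refine ⟨hsym, hend, h3, by omega, ?_⟩
            rw [show col - pvDn board symbol r (col - 1) - 1
                  = col - (1 + pvDn board symbol r (col - 1)) from by ring]
            exact hblank.2
          rw [hCE]
          refine Prod.ext ?_ rfl
          show ls + (1 + pvDn board symbol r (col - 1)) - 1 = ls + pvDn board symbol r (col - 1)
          omega
        · rw [if_neg hblank]
          have hCE : pvCE board symbol r col = 0 := by
            rw [pvCE, if_neg]
            rintro ⟨-, -, -, h4, h5⟩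
            apply hblank
            refine ⟨by omega, ?_⟩
            rw [show col - (1 + pvDn board symbol r (col - 1))
                  = col - pvDn board symbol r (col - 1) - 1 from by ring]
            exact h5
          rw [hCE]
          refine Prod.ext ?_ rfl
          show ls = ls + 0
          omega
      · intro c hc0 hc
        rw [hmemK c]
        have hknc : (c, r) ∉ K := hKnone c hc0 (by omega)
        constructor
        · rintro (hk | ⟨h1, h2⟩)
          · exact absurd hk hknc
          · exact ⟨by omega, fun c' hc1 hc2 => hcells c' (by omega) (by omega)⟩
        · rintro ⟨-, hall'⟩
          right
          refine ⟨?_, by omega⟩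
          have := pvDn_ge board symbol r (col - 1 - c).toNat (col - 1) c (by omega) (by omega)
            (fun c' h1 h2 => hall' c' h1 (by omega))
          omega
      · intro p hp
        constructor
        · intro hk
          rcases List.mem_append.mp hk with hk | hk
          · exact hk
          · obtain ⟨x, -, rfl⟩ := List.mem_map.mp hk
            exact absurd rfl hp
        · intro hk; exact List.mem_append.mpr (Or.inl hk)
    · refine ⟨K, ?_, ?_, fun p _ => Iff.rfl⟩
      · have hCE : pvCE board symbol r col = 0 := by
          rw [pvCE, if_neg]; rintro ⟨h1, -⟩; exact hsym h1
        rw [hCE]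
        simp [pvStepIn, hmem, hsym]
      · intro c hc0 hc
        have h2 := hInv c hc0 (by omega)
        constructor
        · intro hk
          obtain ⟨-, hall⟩ := h2.mp hk
          exact (hsym (hall col (by omega) (by omega))).elim
        · rintro ⟨-, hall⟩
          exact (hsym (hall col (by omega) (by omega))).elim

theorem pvInner (board : List (List String)) (symbol : String) (col : Int)
    (h3 : 3 ≤ col) (hle : col ≤ (board.length : Int) - 1) :
    ∀ (R : List Int) (ls : Int) (K : List (Int × Int)), R.Nodup →
    (∀ r ∈ R, pvInv board symbol col r K) →
    ∃ K'', R.foldl (pvStepIn board symbol col) (ls, K)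
        = (ls + (R.map (fun r => pvCE board symbol r col)).sum, K'')
      ∧ (∀ r ∈ R, pvInv board symbol (col - 1) r K'')
      ∧ (∀ p : Int × Int, p.2 ∉ R → (p ∈ K'' ↔ p ∈ K)) := by
  intro R
  induction R with
  | nil =>
      intro ls K _ _
      exact ⟨K, by simp, by simp, fun p _ => Iff.rfl⟩
  | cons r R' ih =>
      intro ls K hnd hInv
      obtain ⟨K1, hstep, hinv1, hpres1⟩ :=
        pvStep1 board symbol col r ls K (hInv r (by simp)) h3 hle
      have hInv' : ∀ r' ∈ R', pvInv board symbol col r' K1 := by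
        intro r' hr' c h0 h1
        have hne : r' ≠ r := fun he => (List.nodup_cons.mp hnd).1 (he ▸ hr')
        rw [show ((c, r') ∈ K1 ↔ (c, r') ∈ K) from hpres1 (c, r') hne]
        exact hInv r' (by simp [hr']) c h0 h1
      obtain ⟨K2, hfold, hinv2, hpres2⟩ :=
        ih (ls + pvCE board symbol r col) K1 (List.nodup_cons.mp hnd).2 hInv'
      refine ⟨K2, ?_, ?_, ?_⟩
      · rw [List.foldl_cons, hstep, hfold, List.map_cons, List.sum_cons, add_assoc]
      · intro r' hr'
        rcases List.mem_cons.mp hr' with rfl | hr'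
        · intro c h0 h1
          have hrnot : r' ∉ R' := (List.nodup_cons.mp hnd).1
          rw [show ((c, r') ∈ K2 ↔ (c, r') ∈ K1) from hpres2 (c, r') hrnot]
          exact hinv1 c h0 h1
        · exact hinv2 r' hr'
      · intro p hp
        have hp1 : p.2 ∉ R' := fun h => hp (by simp [h])
        have hp2 : p.2 ≠ r := fun h => hp (by simp [h])
        rw [hpres2 p hp1, hpres1 p hp2]

theorem pvOuter (board : List (List String)) (symbol : String) :
    ∀ (k : Nat) (col : Int), col - 2 = (k : Int) → col ≤ (board.length : Int) - 1 →
    ∀ (ls : Int) (K : List (Int × Int)),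
    (∀ r ∈ PySem.List.pyRange 0 ((board.headD []).length : Int) 1, pvInv board symbol col r K) →
    ((PySem.List.pyRange col 2 (-1)).foldl
        (fun st c => (PySem.List.pyRange 0 ((board.headD []).length : Int) 1).foldl (pvStepIn board symbol c) st)
        (ls, K)).1
      = ls + ((PySem.List.pyRange col 2 (-1)).map (fun b =>
          ((PySem.List.pyRange 0 ((board.headD []).length : Int) 1).map
            (fun r => pvCE board symbol r b)).sum)).sum := by
  intro k
  induction k with
  | zero =>
      intro col hk _ ls K _
      rw [show col = (2 : Int) from by omega, PySem.List.pyRange_neg_one_eq_nil le_rfl]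
      simp
  | succ n ih =>
      intro col hk hle ls K hInv
      rw [PySem.List.pyRange_neg_one_cons (show (2 : Int) < col from by omega)]
      rw [List.foldl_cons, List.map_cons, List.sum_cons]
      obtain ⟨K1, hfold, hinv1, -⟩ :=
        pvInner board symbol col (by omega) hle _ ls K
          (PySem.List.nodup_pyRange_one 0 ((board.headD []).length : Int)) hInv
      rw [hfold, ih (col - 1) (by omega) (by omega) _ K1 hinv1]
      ring

theorem pvFoldSum (l : List Int) (f : Int → Int) :
    ∀ s : Int, l.foldl (fun t x => t + f x) s = s + (l.map f).sum := by
  induction l with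
  | nil => intro s; simp
  | cons x l ih => intro s; rw [List.foldl_cons, ih, List.map_cons, List.sum_cons]; ring

theorem pvFoldCongr2 (l : List Int) (f g : Int → Int → Int) (h : ∀ t x, f t x = g t x) :
    ∀ s : Int, l.foldl f s = l.foldl g s := by
  induction l with
  | nil => intro s; rfl
  | cons x l ih => intro s; rw [List.foldl_cons, List.foldl_cons, h s x, ih]

theorem pvSumMapAdd (l : List Int) (f g : Int → Int) :
    (l.map (fun x => f x + g x)).sum = (l.map f).sum + (l.map g).sum := by
  induction l with
  | nil => simp
  | cons x l ih => simp only [List.map_cons, List.sum_cons, ih]; ring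

theorem pvSwap (C R : List Int) (f : Int → Int → Int) :
    (C.map (fun c => (R.map (fun r => f c r)).sum)).sum
      = (R.map (fun r => (C.map (fun c => f c r)).sum)).sum := by
  induction C with
  | nil =>
      symm
      apply List.sum_eq_zero
      intro x hx
      obtain ⟨r, -, rfl⟩ := List.mem_map.mp hx
      simp
  | cons c C ih =>
      simp only [List.map_cons, List.sum_cons, ih]
      exact (pvSumMapAdd R (fun r => f c r) (fun r => (C.map (fun c' => f c' r)).sum)).symm

theorem pvA_eq (board : List (List String)) (symbol : String) :
    left_streak_check board symbol
      = ((PySem.List.pyRange ((board.length : Int) - 1) 2 (-1)).map (fun b =>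
          ((PySem.List.pyRange 0 ((board.headD []).length : Int) 1).map
            (fun r => pvCE board symbol r b)).sum)).sum := by
  show ((PySem.List.pyRange ((board.length : Int) - 1) 2 (-1)).foldl
      (fun st col => (PySem.List.pyRange 0 ((board.headD []).length : Int) 1).foldl
        (pvStepIn board symbol col) st)
      ((0 : Int), ([] : List (Int × Int)))).1 = _
  by_cases h : ((board.length : Int) - 1) ≤ 2
  · rw [PySem.List.pyRange_neg_one_eq_nil h]; simp
  · have hInv0 : ∀ r ∈ PySem.List.pyRange 0 ((board.headD []).length : Int) 1,
        pvInv board symbol ((board.length : Int) - 1) r [] := by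
      intro r _ c h0 h1
      simp only [List.not_mem_nil, false_iff]
      rintro ⟨hlt, -⟩
      omega
    rw [pvOuter board symbol ((board.length : Int) - 1 - 2).toNat ((board.length : Int) - 1)
      (by omega) le_rfl 0 [] hInv0, zero_add]

theorem pvPrefix (board : List (List String)) (symbol : String) :
    ((PySem.List.pyRange 3 (board.length : Int) 1).map (fun b =>
        ((PySem.List.pyRange 0 ((board.headD []).length : Int) 1).map
          (fun r => pvCE board symbol r b)).sum)).sum
      = ((PySem.List.pyRange 0 (board.length : Int) 1).map (fun b =>
          ((PySem.List.pyRange 0 ((board.headD []).length : Int) 1).map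
            (fun r => pvCE board symbol r b)).sum)).sum := by
  have hzero : ∀ b : Int, ¬ 3 ≤ b →
      ((PySem.List.pyRange 0 ((board.headD []).length : Int) 1).map
        (fun r => pvCE board symbol r b)).sum = 0 := by
    intro b hb
    apply List.sum_eq_zero
    intro x hx
    obtain ⟨rr, -, rfl⟩ := List.mem_map.mp hx
    rw [pvCE, if_neg]
    rintro ⟨-, -, h3, -⟩
    exact hb h3
  by_cases h : 3 ≤ (board.length : Int)
  · rw [PySem.List.pyRange_one_append 0 3 (board.length : Int) (by omega) h,
      List.map_append, List.sum_append]
    have h03 : ((PySem.List.pyRange 0 3 1).map (fun b =>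
        ((PySem.List.pyRange 0 ((board.headD []).length : Int) 1).map
          (fun r => pvCE board symbol r b)).sum)).sum = 0 := by
      apply List.sum_eq_zero
      intro x hx
      obtain ⟨b, hb, rfl⟩ := List.mem_map.mp hx
      exact hzero b (by have := (PySem.List.mem_pyRange_one.mp hb).2; omega)
    rw [h03, zero_add]
  · rw [PySem.List.pyRange_one_eq_nil (show (board.length : Int) ≤ 3 from by omega)]
    symm
    apply List.sum_eq_zero
    intro x hx
    obtain ⟨b, hb, rfl⟩ := List.mem_map.mp hx
    have hb2 := (PySem.List.mem_pyRange_one.mp hb).2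
    exact Eq.trans (hzero b (by omega)) (by simp)

-- ===== B-side lemmas =====

theorem pvStrip_length (board : List (List String)) (r : Int) :
    (pvStrip board r).length = board.length := by
  simp [pvStrip]

theorem pvStrip_get (board : List (List String)) (r b : Int) :
    PySem.List.pyGetD (pvStrip board r) b "" = pvCell board b r := by
  have h := PySem.List.pyGetD_map (fun column => PySem.List.pyGetD column r "") board b []
  simpa [pvStrip, pvCell, PySem.List.pyGetD, PySem.List.pyGet?] using h

theorem pvAdv_eq (board : List (List String)) (symbol : String) (r c : Int) :
    pvAdv (pvStrip board r) symbol c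
      = if c < (board.length : Int) ∧ pvCell board c r = symbol then
          pvAdv (pvStrip board r) symbol (c + 1)
        else c := by
  have hlen : ((pvStrip board r).length : Int) = (board.length : Int) := by
    rw [pvStrip_length]
  by_cases hg : c < (board.length : Int) ∧ pvCell board c r = symbol
  · rw [if_pos hg]
    unfold pvAdv
    rw [hlen, show ((board.length : Int) - c).toNat = ((board.length : Int) - (c + 1)).toNat + 1 from by omega]
    simp only [pvAdvF]
    rw [if_pos (by rw [hlen, pvStrip_get]; exact hg)]
  · rw [if_neg hg]
    unfold pvAdv
    cases hn : (((pvStrip board r).length : Int) - c).toNat with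
    | zero => simp only [pvAdvF]
    | succ n =>
        simp only [pvAdvF]
        rw [if_neg (by rw [hlen, pvStrip_get]; exact hg)]

-- ascending induction principle matching pvAdv's recursion
theorem pvUp_ind (board : List (List String)) (symbol : String) (r : Int) (P : Int → Prop)
    (hpos : ∀ c, (c < (board.length : Int) ∧ pvCell board c r = symbol) → P (c + 1) → P c)
    (hneg : ∀ c, ¬ (c < (board.length : Int) ∧ pvCell board c r = symbol) → P c) : ∀ c, P c := by
  have key : ∀ (n : Nat) (c : Int), ((board.length : Int) - c).toNat ≤ n → P c := by
    intro n
    induction n with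
    | zero => intro c hc; exact hneg c (fun h => by omega)
    | succ n ih =>
        intro c hc
        by_cases hg : c < (board.length : Int) ∧ pvCell board c r = symbol
        · exact hpos c hg (ih (c + 1) (by omega))
        · exact hneg c hg
  intro c
  exact key ((board.length : Int) - c).toNat c le_rfl

theorem pvAdv_ge (board : List (List String)) (symbol : String) (r c : Int) :
    c ≤ pvAdv (pvStrip board r) symbol c := by
  refine pvUp_ind board symbol r (fun c => c ≤ pvAdv (pvStrip board r) symbol c) ?_ ?_ c
  · intro c hg ih; rw [pvAdv_eq, if_pos hg]; omega
  · intro c hg; rw [pvAdv_eq board symbol r c, if_neg hg]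

theorem pvAdv_le (board : List (List String)) (symbol : String) (r c : Int)
    (hc : c ≤ (board.length : Int)) :
    pvAdv (pvStrip board r) symbol c ≤ (board.length : Int) := by
  refine pvUp_ind board symbol r
    (fun c => c ≤ (board.length : Int) → pvAdv (pvStrip board r) symbol c ≤ (board.length : Int))
    ?_ ?_ c hc
  · intro c hg ih _; rw [pvAdv_eq, if_pos hg]; exact ih (by omega)
  · intro c hg h; rw [pvAdv_eq board symbol r c, if_neg hg]; exact h

theorem pvAdv_mem (board : List (List String)) (symbol : String) (r c : Int) :
    ∀ x, c ≤ x → x < pvAdv (pvStrip board r) symbol c → pvCell board x r = symbol := by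
  refine pvUp_ind board symbol r
    (fun c => ∀ x, c ≤ x → x < pvAdv (pvStrip board r) symbol c → pvCell board x r = symbol)
    ?_ ?_ c
  · intro c hg ih x h1 h2
    rcases eq_or_lt_of_le h1 with rfl | hlt
    · exact hg.2
    · rw [pvAdv_eq, if_pos hg] at h2
      exact ih x (by omega) h2
  · intro c hg x h1 h2
    rw [pvAdv_eq board symbol r c, if_neg hg] at h2
    omega

theorem pvAdv_top (board : List (List String)) (symbol : String) (r c : Int) :
    ¬ (pvAdv (pvStrip board r) symbol c < (board.length : Int)
        ∧ pvCell board (pvAdv (pvStrip board r) symbol c) r = symbol) := by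
  refine pvUp_ind board symbol r
    (fun c => ¬ (pvAdv (pvStrip board r) symbol c < (board.length : Int)
        ∧ pvCell board (pvAdv (pvStrip board r) symbol c) r = symbol)) ?_ ?_ c
  · intro c hg ih
    rw [pvAdv_eq, if_pos hg]
    exact ih
  · intro c hg
    rw [pvAdv_eq board symbol r c, if_neg hg]
    exact hg

-- the per-row scan of B books exactly A's per-right-end contributions pvCE
theorem pvScan_spec (board : List (List String)) (symbol : String) (r : Int) :
    ∀ (n : Nat) (c total : Int), 0 ≤ c → ((board.length : Int) - c).toNat ≤ n →
    (c < (board.length : Int) → pvCell board c r = symbol → ¬ (0 ≤ c - 1 ∧ pvCell board (c - 1) r = symbol)) →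
    pvScanF (pvStrip board r) symbol n c total
      = total + ((PySem.List.pyRange c (board.length : Int) 1).map
          (fun b => pvCE board symbol r b)).sum := by
  intro n
  induction n with
  | zero =>
      intro c total hc hn _
      have hge : (board.length : Int) ≤ c := by omega
      simp only [pvScanF]
      rw [PySem.List.pyRange_one_eq_nil hge]
      simp
  | succ n ih =>
      intro c total hc hn hH
      simp only [pvScanF]
      rw [pvStrip_length]
      by_cases hlt : c < (board.length : Int)
      · rw [if_pos hlt, pvStrip_get]
        by_cases hsym : pvCell board c r = symbol
        · rw [if_pos hsym]
          have hstart := hH hlt hsym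
          set c' := pvAdv (pvStrip board r) symbol c with hc'
          have hge : c + 1 ≤ c' := by
            have := pvAdv_ge board symbol r (c + 1)
            rw [hc', pvAdv_eq, if_pos ⟨hlt, hsym⟩]
            omega
          have hle : c' ≤ (board.length : Int) := pvAdv_le board symbol r c (by omega)
          have hcells : ∀ x, c ≤ x → x < c' → pvCell board x r = symbol :=
            pvAdv_mem board symbol r c
          have htop := pvAdv_top board symbol r c
          rw [← hc'] at htop
          -- the next call satisfies the run-start hypothesis
          have hH' : c' < (board.length : Int) → pvCell board c' r = symbol
              → ¬ (0 ≤ c' - 1 ∧ pvCell board (c' - 1) r = symbol) := by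
            intro hlt' hs
            exact absurd ⟨hlt', hs⟩ htop
          rw [ih c' _ (by omega) (by omega) hH']
          -- split the range [c, len) = [c, c'-1) ++ [c'-1] ++ [c', len)
          have hsplit1 : PySem.List.pyRange c (board.length : Int) 1
              = PySem.List.pyRange c c' 1 ++ PySem.List.pyRange c' (board.length : Int) 1 :=
            PySem.List.pyRange_one_append c c' (board.length : Int) (by omega) hle
          have hsplit2 : PySem.List.pyRange c c' 1
              = PySem.List.pyRange c (c' - 1) 1 ++ [c' - 1] := by
            have h2 := PySem.List.pyRange_one_succ_right (show c ≤ c' - 1 from by omega)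
            rw [show c' - 1 + 1 = c' from by ring] at h2
            exact h2
          have hzeros : ((PySem.List.pyRange c (c' - 1) 1).map
              (fun b => pvCE board symbol r b)).sum = 0 := by
            apply List.sum_eq_zero
            intro x hx
            obtain ⟨b, hb, rfl⟩ := List.mem_map.mp hx
            obtain ⟨hb1, hb2⟩ := PySem.List.mem_pyRange_one.mp hb
            rw [pvCE, if_neg]
            rintro ⟨-, hre, -⟩
            rcases hre with he | he
            · omega
            · exact he (hcells (b + 1) (by omega) (by omega))
          have hDn : pvDn board symbol r (c' - 1 - 1) = c' - 1 - c := by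
            have h := pvDn_run board symbol r c hc hstart (c' - 1 - c).toNat (c' - 2)
              (by omega) (by omega) (fun x h1 h2 => hcells x h1 (by omega))
            rw [show c' - 1 - 1 = c' - 2 from by ring, h]
            ring
          have hend : c' - 1 = (board.length : Int) - 1 ∨ pvCell board (c' - 1 + 1) r ≠ symbol := by
            by_cases hl : c' = (board.length : Int)
            · left; omega
            · right
              rw [show c' - 1 + 1 = c' from by ring]
              exact fun hs => htop ⟨by omega, hs⟩
          have hCE : pvCE board symbol r (c' - 1)
              = if 3 ≤ c' - 1 ∧ 1 ≤ c ∧ pvCell board (c - 1) r = " "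
                then c' - 1 - c else 0 := by
            rw [pvCE, hDn, show c' - 1 - (c' - 1 - c) = c from by ring]
            by_cases hcond : 3 ≤ c' - 1 ∧ 1 ≤ c ∧ pvCell board (c - 1) r = " "
            · rw [if_pos hcond, if_pos ⟨hcells (c' - 1) (by omega) (by omega), hend,
                hcond.1, hcond.2.1, hcond.2.2⟩]
            · rw [if_neg hcond, if_neg]
              rintro ⟨-, -, h3, h4, h5⟩
              exact hcond ⟨h3, h4, h5⟩
          rw [hsplit1, hsplit2, List.map_append, List.map_append, List.sum_append,
            List.sum_append, hzeros, List.map_cons, List.map_nil, List.sum_cons,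
            List.sum_nil, hCE, pvStrip_get]
          by_cases hcond : 3 ≤ c' - 1 ∧ 1 ≤ c ∧ pvCell board (c - 1) r = " "
          · rw [if_pos hcond, if_pos hcond]; ring
          · rw [if_neg hcond, if_neg hcond]; ring
        · rw [if_neg hsym]
          rw [ih (c + 1) total (by omega) (by omega)
            (by intro _ _; rw [show c + 1 - 1 = c from by ring]; exact fun hh => hsym hh.2)]
          rw [PySem.List.pyRange_one_cons (show c < (board.length : Int) from hlt)]
          have hCE0 : pvCE board symbol r c = 0 := by
            rw [pvCE, if_neg]; rintro ⟨h1, -⟩; exact hsym h1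
          rw [List.map_cons, List.sum_cons, hCE0, zero_add]
      · rw [if_neg hlt]
        rw [PySem.List.pyRange_one_eq_nil (by omega)]
        simp

theorem pvB_eq (board : List (List String)) (symbol : String) :
    left_streak_check_alt board symbol
      = ((PySem.List.pyRange 0 ((board.headD []).length : Int) 1).map (fun r =>
          ((PySem.List.pyRange 0 (board.length : Int) 1).map
            (fun b => pvCE board symbol r b)).sum)).sum := by
  unfold left_streak_check_alt
  by_cases hb : board = []
  · subst hb
    simp only [List.length_nil, Nat.cast_zero]
    symm
    apply List.sum_eq_zero
    intro x hx
    obtain ⟨r, -, rfl⟩ := List.mem_map.mp hx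
    rw [PySem.List.pyRange_one_eq_nil le_rfl]
    simp
  · rw [if_neg hb]
    refine Eq.trans (pvFoldCongr2 _ _
      (fun total r => total + ((PySem.List.pyRange 0 (board.length : Int) 1).map
        (fun b => pvCE board symbol r b)).sum) ?_ 0) ?_
    · intro t r
      rw [pvScan_spec board symbol r (pvStrip board r).length 0 t le_rfl
        (by rw [pvStrip_length]; omega)
        (by intro _ _; rintro ⟨h0, -⟩; omega)]
    · exact Eq.trans (pvFoldSum _ _ 0) (zero_add _)

-- ===== VERDICT (by name: the statement is the Claim_ definition above) =====
theorem left_streak_check_spec : Claim_equal_left_streak_check := by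
  intro board symbol _ _
  unfold Spec_left_streak_check
  rw [pvA_eq board symbol, pvB_eq board symbol]
  rw [PySem.List.pyRange_neg_one_eq_reverse]
  rw [show (2 : Int) + 1 = 3 from by norm_num,
    show (board.length : Int) - 1 + 1 = (board.length : Int) from by ring]
  rw [List.map_reverse, List.sum_reverse]
  rw [pvPrefix board symbol]
  exact pvSwap _ _ (fun b r => pvCE board symbol r b)
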